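-- pv_equiv track=rewrite | github.com/CodingThrust/problem-reductions | docs/paper/verify-reductions/verify_three_dimensional_matching_three_partition.py | eval_3dm
-- ===== SOURCE A (Python) =====
-- def eval_3dm(q: int, triples: list[tuple[int, int, int]],
--              config: list[int]) -> bool:
--     """Evaluate whether config is a valid 3DM solution."""
--     if len(config) != len(triples):
--         return False
--     selected = [i for i, v in enumerate(config) if v == 1]
--     if len(selected) != q:
--         return False
--     used_w = set()
--     used_x = set()
--     used_y = set()
--     for idx in selected:
--         a, b, c = triples[idx]
--         if a in used_w or b in used_x or c in used_y:
--             return False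
--         used_w.add(a)
--         used_x.add(b)
--         used_y.add(c)
--     return len(used_w) == q and len(used_x) == q and len(used_y) == q
-- ===== SOURCE B (Python) =====
-- def _distinct(vals):
--     col = sorted(vals)
--     return not any(a == b for a, b in zip(col, col[1:]))
--
--
-- def eval_3dm(q: int, triples: list[tuple[int, int, int]],
--              config: list[int]) -> bool:
--     """Evaluate whether config is a valid 3DM solution."""
--     if len(config) != len(triples):
--         return False
--     chosen = [t for t, v in zip(triples, config) if v == 1]
--     if len(chosen) != q:
--         return False
--     return (_distinct([t[0] for t in chosen])
--             and _distinct([t[1] for t in chosen])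
--             and _distinct([t[2] for t in chosen]))
-- ===== Notes on version B (the rewrite author's own statement) =====
-- stated objective: alternative
-- what changed: Replaces A's index-driven streaming loop (enumerate indices, triples[idx] lookups, three growing hash sets with early exit) by zipping triples with config to gather the chosen triples directly, then checking each coordinate column for duplicates by sorting it and scanning adjacent pairs; A's post-loop length check is always true when reached, so the results coincide.
import Mathlib
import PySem

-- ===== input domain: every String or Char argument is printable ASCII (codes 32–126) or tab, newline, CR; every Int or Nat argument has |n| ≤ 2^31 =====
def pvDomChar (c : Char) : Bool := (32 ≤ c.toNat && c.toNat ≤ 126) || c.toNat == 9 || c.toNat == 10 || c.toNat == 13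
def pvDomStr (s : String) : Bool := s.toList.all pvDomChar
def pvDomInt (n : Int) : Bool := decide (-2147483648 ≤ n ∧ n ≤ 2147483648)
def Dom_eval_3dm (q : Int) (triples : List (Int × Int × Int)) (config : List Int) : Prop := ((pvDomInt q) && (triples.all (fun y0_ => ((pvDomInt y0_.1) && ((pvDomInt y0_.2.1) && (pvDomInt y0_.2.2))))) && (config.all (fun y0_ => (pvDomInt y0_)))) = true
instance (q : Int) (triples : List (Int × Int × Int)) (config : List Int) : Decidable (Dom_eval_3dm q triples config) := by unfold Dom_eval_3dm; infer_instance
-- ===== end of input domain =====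

-- B replaces A's index-driven loop (three growing sets, early exit) by zipping triples with
-- config and checking each coordinate column for duplicates via sort-then-adjacent-scan:
-- an alternative algorithm of similar cost.


-- ===== PORT A =====
-- A's 'for idx in selected' loop: three growing sets, early return (none) on a collision.
-- triples[idx] is ported as pyGetD with a dummy default: every idx in 'selected' is a valid
-- nonnegative index (selected ⊆ range(len(config)) and len(config) == len(triples)), so Python
-- never raises here and the default is never read.
def evalLoopA (triples : List (Int × Int × Int)) :
    List Int → PySem.Set Int → PySem.Set Int → PySem.Set Int →
    Option (PySem.Set Int × PySem.Set Int × PySem.Set Int)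
  | [], w, x, y => some (w, x, y)
  | idx :: rest, w, x, y =>
    let t := PySem.List.pyGetD triples idx (0, 0, 0)
    if PySem.Set.contains w t.1 || PySem.Set.contains x t.2.1 || PySem.Set.contains y t.2.2 then
      none
    else
      evalLoopA triples rest (PySem.Set.add w t.1) (PySem.Set.add x t.2.1) (PySem.Set.add y t.2.2)

def eval_3dm (q : Int) (triples : List (Int × Int × Int)) (config : List Int) : Bool :=
  if (config.length : Int) ≠ (triples.length : Int) then false
  else
    let selected := (PySem.List.enumerate config 0).filterMap
      (fun p => if p.2 == 1 then some p.1 else none)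
    if (selected.length : Int) ≠ q then false
    else
      match evalLoopA triples selected [] [] [] with
      | none => false
      | some (w, x, y) =>
        decide ((PySem.Set.len w : Int) = q) && decide ((PySem.Set.len x : Int) = q) &&
          decide ((PySem.Set.len y : Int) = q)

-- ===== PORT B =====
-- B's '_distinct': sort the column, scan adjacent pairs (zip(col, col[1:])) for an equal pair.
def distinctCol (vals : List Int) : Bool :=
  let col := PySem.List.sorted vals (fun x => x) false
  !((col.zip (col.drop 1)).any (fun p => p.1 == p.2))

def eval_3dm_alt (q : Int) (triples : List (Int × Int × Int)) (config : List Int) : Bool :=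
  if (config.length : Int) ≠ (triples.length : Int) then false
  else
    let chosen := (triples.zip config).filterMap
      (fun p => if p.2 == 1 then some p.1 else none)
    if (chosen.length : Int) ≠ q then false
    else
      distinctCol (chosen.map (fun t => t.1)) &&
        (distinctCol (chosen.map (fun t => t.2.1)) && distinctCol (chosen.map (fun t => t.2.2)))

-- ===== PRECONDITION & SPEC =====
def Spec_eval_3dm (q : Int) (triples : List (Int × Int × Int)) (config : List Int) (out : Bool) : Prop := out = eval_3dm_alt q triples config
instance (q : Int) (triples : List (Int × Int × Int)) (config : List Int) (out : Bool) : Decidable (Spec_eval_3dm q triples config out) := by unfold Spec_eval_3dm; infer_instance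

-- ===== CLAIM (what is proved, stated in full; the proofs are below) =====
def Claim_equal_eval_3dm : Prop := ∀ (q : Int) (triples : List (Int × Int × Int)) (config : List Int), Dom_eval_3dm q triples config → Spec_eval_3dm q triples config (eval_3dm q triples config)

-- ===== LEMMAS AND PROOFS =====

-- on success A's loop has added exactly one (fresh) element to each set per selected index
theorem evalLoopA_some_len (triples : List (Int × Int × Int)) :
    ∀ (sel : List Int) (w x y w' x' y' : PySem.Set Int),
      evalLoopA triples sel w x y = some (w', x', y') →
      w'.length = w.length + sel.length ∧ x'.length = x.length + sel.length ∧
        y'.length = y.length + sel.length := by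
  intro sel
  induction sel with
  | nil =>
    intro w x y w' x' y' h
    simp only [evalLoopA, Option.some.injEq, Prod.mk.injEq] at h
    obtain ⟨rfl, rfl, rfl⟩ := h
    simp
  | cons idx rest ih =>
    intro w x y w' x' y' h
    simp only [evalLoopA] at h
    split at h
    · exact absurd h (by simp)
    · rename_i hc
      have hw : (PySem.List.pyGetD triples idx (0, 0, 0)).1 ∉ w := fun hm =>
        hc (by simp [hm])
      have hx : (PySem.List.pyGetD triples idx (0, 0, 0)).2.1 ∉ x := fun hm =>
        hc (by simp [hm])
      have hy : (PySem.List.pyGetD triples idx (0, 0, 0)).2.2 ∉ y := fun hm =>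
        hc (by simp [hm])
      obtain ⟨e1, e2, e3⟩ := ih _ _ _ _ _ _ h
      rw [PySem.Set.add_of_not_mem hw] at e1
      rw [PySem.Set.add_of_not_mem hx] at e2
      rw [PySem.Set.add_of_not_mem hy] at e3
      simp only [List.length_append, List.length_cons, List.length_nil] at e1 e2 e3 ⊢
      omega

-- A's loop succeeds iff each projected column is duplicate-free and disjoint from its accumulator
theorem evalLoopA_isSome_iff (triples : List (Int × Int × Int)) :
    ∀ (sel : List Int) (w x y : PySem.Set Int),
      (evalLoopA triples sel w x y).isSome = true ↔
        ((sel.map (fun i => (PySem.List.pyGetD triples i (0, 0, 0)).1)).Nodup ∧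
          ∀ a ∈ sel.map (fun i => (PySem.List.pyGetD triples i (0, 0, 0)).1), a ∉ w) ∧
        ((sel.map (fun i => (PySem.List.pyGetD triples i (0, 0, 0)).2.1)).Nodup ∧
          ∀ a ∈ sel.map (fun i => (PySem.List.pyGetD triples i (0, 0, 0)).2.1), a ∉ x) ∧
        ((sel.map (fun i => (PySem.List.pyGetD triples i (0, 0, 0)).2.2)).Nodup ∧
          ∀ a ∈ sel.map (fun i => (PySem.List.pyGetD triples i (0, 0, 0)).2.2), a ∉ y) := by
  intro sel
  induction sel with
  | nil => intro w x y; simp [evalLoopA]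
  | cons idx rest ih =>
    intro w x y
    simp only [evalLoopA]
    split <;> rename_i hc <;>
      simp only [Bool.or_eq_true, PySem.Set.contains_iff, not_or] at hc
    · simp only [Option.isSome_none, List.map_cons, List.nodup_cons, List.forall_mem_cons,
        List.mem_map, not_exists, not_and]
      constructor
      · intro h; cases h
      · rintro ⟨⟨_, hw, _⟩, ⟨_, hx, _⟩, ⟨_, hy, _⟩⟩
        tauto
    · rw [ih]
      simp only [List.map_cons, List.nodup_cons, List.forall_mem_cons, PySem.Set.mem_add,
        not_or]
      constructor
      · rintro ⟨⟨hn1, h1⟩, ⟨hn2, h2⟩, ⟨hn3, h3⟩⟩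
        refine ⟨⟨⟨fun hm => (h1 _ hm).2 rfl, hn1⟩, ?_, fun a ha => (h1 a ha).1⟩,
                ⟨⟨fun hm => (h2 _ hm).2 rfl, hn2⟩, ?_, fun a ha => (h2 a ha).1⟩,
                ⟨⟨fun hm => (h3 _ hm).2 rfl, hn3⟩, ?_, fun a ha => (h3 a ha).1⟩⟩ <;> tauto
      · rintro ⟨⟨⟨hh1, hn1⟩, hw, h1⟩, ⟨⟨hh2, hn2⟩, hx, h2⟩, ⟨⟨hh3, hn3⟩, hy, h3⟩⟩
        refine ⟨⟨hn1, fun a ha => ⟨h1 a ha, fun hEq => hh1 (hEq ▸ ha)⟩⟩,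
                ⟨hn2, fun a ha => ⟨h2 a ha, fun hEq => hh2 (hEq ▸ ha)⟩⟩,
                ⟨hn3, fun a ha => ⟨h3 a ha, fun hEq => hh3 (hEq ▸ ha)⟩⟩⟩

-- a (≤)-sorted list has no equal adjacent pair iff it has no duplicates at all
theorem adj_scan_nodup : ∀ (col : List Int), col.Pairwise (· ≤ ·) →
    (((col.zip (col.drop 1)).any (fun p => p.1 == p.2)) = false ↔ col.Nodup) := by
  intro col
  induction col with
  | nil => simp
  | cons a rest ih =>
    intro hp
    cases rest with
    | nil => simp
    | cons b t =>
      rw [List.pairwise_cons] at hp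
      obtain ⟨hle, hp'⟩ := hp
      have hab := hle b (by simp)
      have ih' := ih hp'
      simp only [List.drop_succ_cons, List.drop_zero] at ih'
      simp only [List.drop_succ_cons, List.drop_zero, List.zip_cons_cons, List.any_cons,
        Bool.or_eq_false_iff, beq_eq_false_iff_ne, ne_eq]
      rw [ih']
      constructor
      · rintro ⟨hne, hnd⟩
        rw [List.nodup_cons]
        refine ⟨?_, hnd⟩
        intro hmem
        rcases List.mem_cons.mp hmem with rfl | hmt
        · exact hne rfl
        · exact hne (le_antisymm hab ((List.pairwise_cons.mp hp').1 a hmt))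
      · intro hnd
        rw [List.nodup_cons] at hnd
        exact ⟨fun hEq => hnd.1 (hEq ▸ List.mem_cons_self ..), hnd.2⟩

-- B's helper decides duplicate-freeness of the original column
theorem distinctCol_iff (vals : List Int) : distinctCol vals = true ↔ vals.Nodup := by
  unfold distinctCol
  have hperm := PySem.List.sorted_perm vals (fun x => x) false
  have hpw := PySem.List.sorted_pairwise vals (fun x => x)
  rw [Bool.not_eq_eq_eq_not, Bool.not_true, adj_scan_nodup _ hpw]
  exact hperm.nodup_iff

-- the selected indices, looked up in triples, are exactly the triples zipped-filtered by config
theorem selected_map_eq :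
    ∀ (config : List Int) (pre suf : List (Int × Int × Int)), suf.length = config.length →
      ((PySem.List.enumerate config (pre.length : Int)).filterMap
          (fun p => if p.2 == 1 then some p.1 else none)).map
        (fun i => PySem.List.pyGetD (pre ++ suf) i (0, 0, 0))
      = (suf.zip config).filterMap (fun p => if p.2 == 1 then some p.1 else none) := by
  intro config
  induction config with
  | nil =>
    intro pre suf h
    cases suf
    · simp [PySem.List.enumerate_nil]
    · simp at h
  | cons v cs ih =>
    intro pre suf h
    cases suf with
    | nil => simp at h
    | cons t ts =>
      have hlen : ts.length = cs.length := by simpa using h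
      have hstep := ih (pre ++ [t]) ts hlen
      have hcast : ((pre ++ [t]).length : Int) = (pre.length : Int) + 1 := by
        simp
      rw [hcast, List.append_assoc] at hstep
      simp only [List.singleton_append] at hstep
      rw [PySem.List.enumerate_cons, List.zip_cons_cons]
      by_cases hv : v = 1
      · subst hv
        simp only [List.filterMap_cons, beq_self_eq_true, if_true, List.map_cons]
        exact congrArg₂ List.cons
          (by rw [PySem.List.pyGetD_natCast]; simp) hstep
      · have hv' : (v == 1) = false := by simp [hv]
        simp only [List.filterMap_cons, hv', Bool.false_eq_true, if_false]
        exact hstep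

-- ===== VERDICT (by name: the statement is the Claim_ definition above) =====
theorem eval_3dm_spec : Claim_equal_eval_3dm := by
  intro q triples config _
  unfold Spec_eval_3dm eval_3dm eval_3dm_alt
  by_cases hlen : (config.length : Int) ≠ (triples.length : Int)
  · simp only [if_pos hlen]
  · simp only [if_neg hlen]
    rw [not_ne_iff] at hlen
    have hlenN : triples.length = config.length := by exact_mod_cast hlen.symm
    set selected := (PySem.List.enumerate config 0).filterMap
      (fun p => if p.2 == 1 then some p.1 else none) with hsel
    set chosen := (triples.zip config).filterMap
      (fun p => if p.2 == 1 then some p.1 else none) with hch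
    have hmap : selected.map (fun i => PySem.List.pyGetD triples i (0, 0, 0)) = chosen := by
      have h0 := selected_map_eq config [] triples hlenN
      simp only [List.length_nil, Nat.cast_zero, List.nil_append] at h0
      exact h0
    have hchlen : chosen.length = selected.length := by
      rw [← hmap, List.length_map]
    by_cases hq : (selected.length : Int) ≠ q
    · rw [if_pos hq, if_pos (by rw [hchlen]; exact hq)]
    · rw [if_neg hq, if_neg (by rw [hchlen]; exact hq)]
      rw [not_ne_iff] at hq
      have hcol1 : selected.map (fun i => (PySem.List.pyGetD triples i (0, 0, 0)).1)
          = chosen.map (fun t => t.1) := by rw [← hmap, List.map_map]; rfl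
      have hcol2 : selected.map (fun i => (PySem.List.pyGetD triples i (0, 0, 0)).2.1)
          = chosen.map (fun t => t.2.1) := by rw [← hmap, List.map_map]; rfl
      have hcol3 : selected.map (fun i => (PySem.List.pyGetD triples i (0, 0, 0)).2.2)
          = chosen.map (fun t => t.2.2) := by rw [← hmap, List.map_map]; rfl
      have hiff := evalLoopA_isSome_iff triples selected [] [] []
      simp only [List.not_mem_nil, not_false_iff, implies_true, and_true,
        hcol1, hcol2, hcol3] at hiff
      match hloop : evalLoopA triples selected [] [] [] with
      | none =>
        rw [hloop] at hiff
        simp only [Option.isSome_none, Bool.false_eq_true, false_iff, not_and_or] at hiff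
        symm
        rw [Bool.and_eq_false_iff]
        rcases hiff with h | h | h
        · left; rw [Bool.eq_false_iff]; intro hc; exact h ((distinctCol_iff _).mp hc)
        · right; rw [Bool.and_eq_false_iff]; left
          rw [Bool.eq_false_iff]; intro hc; exact h ((distinctCol_iff _).mp hc)
        · right; rw [Bool.and_eq_false_iff]; right
          rw [Bool.eq_false_iff]; intro hc; exact h ((distinctCol_iff _).mp hc)
      | some wxy =>
        obtain ⟨w, x, y⟩ := wxy
        rw [hloop] at hiff
        simp only [Option.isSome_some, true_iff] at hiff
        obtain ⟨hn1, hn2, hn3⟩ := hiff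
        obtain ⟨e1, e2, e3⟩ := evalLoopA_some_len triples selected [] [] [] w x y hloop
        simp only [List.length_nil, Nat.zero_add] at e1 e2 e3
        have d1 := (distinctCol_iff (chosen.map (fun t => t.1))).mpr hn1
        have d2 := (distinctCol_iff (chosen.map (fun t => t.2.1))).mpr hn2
        have d3 := (distinctCol_iff (chosen.map (fun t => t.2.2))).mpr hn3
        simp [PySem.Set.len, e1, e2, e3, hq, d1, d2, d3]
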